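-- pv_equiv track=rewrite | github.com/TimeB1729/codeforces | educational round 179 (div. 2)/pC.py | dict_runs
-- ===== SOURCE A (Python) =====
-- def dict_runs(arr: list) -> dict:
--     runs = {}
--     if not arr:
--         return runs
--
--     current = arr[0]
--     count = 1
--     max_runs = {current: 1}
--
--     for i in range(1, len(arr)):
--         if arr[i] == current:
--             count += 1
--         else:
--             max_runs[current] = max(max_runs.get(current, 0), count)
--             current = arr[i]
--             count = 1
--         max_runs[current] = max(max_runs.get(current, 0), count)
--
--     return max_runs
-- ===== SOURCE B (Python) =====
-- def dict_runs(arr: list) -> dict: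
--     d = {}
--     i = 0
--     length = len(arr)
--     while i < length:
--         v = arr[i]
--         j = i + 1
--         while j < length and arr[j] == v:
--             j += 1
--         if j - i > d.get(v, 0):
--             d[v] = j - i
--         i = j
--     return d
-- ===== Notes on version B (the rewrite author's own statement) =====
-- stated objective: alternative
-- what changed: B consumes the array run-by-run with an index cursor (an inner scan finds each run's end, one conditional dict update per run) instead of A's single element-wise loop that rewrites the dict entry on every iteration.
import Mathlib
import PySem

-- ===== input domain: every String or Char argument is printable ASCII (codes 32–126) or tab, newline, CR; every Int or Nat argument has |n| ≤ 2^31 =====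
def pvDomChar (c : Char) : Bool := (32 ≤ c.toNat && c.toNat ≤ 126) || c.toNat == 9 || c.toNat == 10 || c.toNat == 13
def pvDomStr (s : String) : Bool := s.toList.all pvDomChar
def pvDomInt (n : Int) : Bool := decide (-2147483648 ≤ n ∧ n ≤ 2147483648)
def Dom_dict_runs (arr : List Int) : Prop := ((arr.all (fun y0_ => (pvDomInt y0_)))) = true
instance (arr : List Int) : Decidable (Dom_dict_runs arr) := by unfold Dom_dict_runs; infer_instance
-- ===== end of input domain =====

-- B rewrites A's element-wise loop (which rewrites the dict entry on every element) into a
-- run-by-run consumption of the list with one conditional dict update per run; same cost class.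

-- ===== PORT A =====
-- loop body of A: branch on arr[i] == current, then the unconditional
-- max_runs[current] = max(max_runs.get(current, 0), count)
def pvStepA (s : Int × Int × PySem.Dict Int Int) (x : Int) : Int × Int × PySem.Dict Int Int :=
  let s' : Int × Int × PySem.Dict Int Int :=
    if x = s.1 then (s.1, s.2.1 + 1, s.2.2)
    else (x, 1, s.2.2.insert s.1 (max (s.2.2.getD s.1 0) s.2.1))
  (s'.1, s'.2.1, s'.2.2.insert s'.1 (max (s'.2.2.getD s'.1 0) s'.2.1))

def dict_runs (arr : List Int) : List (Int × Int) :=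
  match arr with
  | [] => ([] : List (Int × Int))     -- 'if not arr: return runs' with runs = {}
  | _ :: _ =>
    -- current = arr[0]; count = 1; max_runs = {current: 1}; for i in range(1, len(arr)): …
    ((PySem.List.pyRange 1 (arr.length : Int) 1).foldl
        (fun s i => pvStepA s (PySem.List.pyGetD arr i 0))
        (PySem.List.pyGetD arr 0 0, 1,
          PySem.Dict.empty.insert (PySem.List.pyGetD arr 0 0) 1)).2.2.items

-- ===== PORT B =====
-- inner while of B: j = i + 1; while j < length and arr[j] == v: j += 1  — the scan past i,
-- counted on the list remaining after position i (j - i = 1 + pvRunLen v t)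
def pvRunLen (v : Int) : List Int → Nat
  | [] => 0
  | x :: t => if x = v then 1 + pvRunLen v t else 0

-- outer while of B over the cursor i, carried as the list remaining from position i:
-- read the run at the cursor, update d once, advance the cursor past the run
def pvAltGo (d : PySem.Dict Int Int) : List Int → PySem.Dict Int Int
  | [] => d
  | v :: t =>
    let n : Int := 1 + (pvRunLen v t : Int)
    let d' := if d.getD v 0 < n then d.insert v n else d
    pvAltGo d' (t.drop (pvRunLen v t))
termination_by l => l.length
decreasing_by
  simp only [List.length_cons, List.length_drop]
  omega

def dict_runs_alt (arr : List Int) : List (Int × Int) :=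
  (pvAltGo PySem.Dict.empty arr).items

-- ===== PRECONDITION & SPEC =====
def Spec_dict_runs (arr : List Int) (out : List (Int × Int)) : Prop := out = dict_runs_alt arr
instance (arr : List Int) (out : List (Int × Int)) : Decidable (Spec_dict_runs arr out) := by unfold Spec_dict_runs; infer_instance

-- ===== CLAIM (what is proved, stated in full; the proofs are below) =====
def Claim_equal_dict_runs : Prop := ∀ (arr : List Int), Dom_dict_runs arr → Spec_dict_runs arr (dict_runs arr)

-- ===== LEMMAS AND PROOFS =====

-- inserting a key twice keeps only the second write (no unique-keys hypothesis needed)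
theorem pv_insert_insert (d : PySem.Dict Int Int) (k : Int) (v1 v2 : Int) :
    (d.insert k v1).insert k v2 = d.insert k v2 := by
  obtain ⟨items⟩ := d
  simp only [PySem.Dict.insert, PySem.Dict.contains]
  by_cases h : (items.any fun p => p.1 == k) = true
  · have h1 : ((List.map (fun p => if (p.1 == k) = true then (k, v1) else p) items).any
        fun p => p.1 == k) = true := by
      rcases List.any_eq_true.mp h with ⟨p, hp, hpk⟩
      exact List.any_eq_true.mpr
        ⟨(k, v1), List.mem_map.mpr ⟨p, hp, by simp [hpk]⟩, by simp⟩
    simp only [h, h1, if_pos]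
    congr 1
    rw [List.map_map]
    apply List.map_congr_left
    intro p _
    by_cases hpk : (p.1 == k) = true <;> simp [Function.comp, hpk]
  · have h1 : ((items ++ [(k, v1)]).any fun p => p.1 == k) = true := by simp
    simp only [h, h1, if_pos, if_neg, Bool.false_eq_true, not_false_iff]
    congr 1
    rw [List.map_append]
    have hid : List.map (fun p => if (p.1 == k) = true then (k, v2) else p) items = items := by
      have hall : ∀ p ∈ items, (p.1 == k) = false := by
        intro p hp
        by_contra hc
        exact h (List.any_eq_true.mpr ⟨p, hp, by simpa using hc⟩)
      conv_rhs => rw [← List.map_id items]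
      apply List.map_congr_left
      intro p hp
      simp [hall p hp]
    rw [hid]
    simp

-- rewriting a present key with its current value is the identity (needs unique keys)
theorem pv_insert_self (d : PySem.Dict Int Int) (k : Int) (v : Int)
    (hnd : d.keys.Nodup) (hv : d.get? k = some v) : d.insert k v = d := by
  obtain ⟨items⟩ := d
  induction items with
  | nil => simp [PySem.Dict.get?] at hv
  | cons p rest ih =>
    simp only [PySem.Dict.keys, List.map_cons, List.nodup_cons, List.mem_map] at hnd
    by_cases hp : p.1 = k
    · have hfind : List.find? (fun q => q.1 == k) (p :: rest) = some p := by
        rw [List.find?_cons_of_pos]; simp [hp]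
      have hv2 : p.2 = v := by simpa [PySem.Dict.get?, hfind] using hv
      have hpv : p = (k, v) := by
        cases p with | mk a b => simp_all
      have hnone : ∀ q ∈ rest, (q.1 == k) = false := by
        intro q hq
        by_contra hqe
        simp only [Bool.not_eq_false, beq_iff_eq] at hqe
        exact hnd.1 ⟨q, hq, by rw [hqe, ← hp]⟩
      have hcont : (PySem.Dict.mk (p :: rest)).contains k = true := by
        simp [PySem.Dict.contains, List.any_cons, hp]
      simp only [PySem.Dict.insert, hcont, if_pos]
      congr 1
      simp only [List.map_cons, hp, beq_self_eq_true, if_pos]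
      rw [hpv]
      congr 1
      conv_rhs => rw [← List.map_id rest]
      apply List.map_congr_left
      intro q hq
      simp [hnone q hq]
    · have hv' : (PySem.Dict.mk rest).get? k = some v := by
        simpa [PySem.Dict.get?, List.find?_cons, hp] using hv
      have hnd' : (PySem.Dict.mk rest).keys.Nodup := hnd.2
      have ihr := ih hnd' hv'
      have hcr : (PySem.Dict.mk rest).contains k = true := by
        simp only [PySem.Dict.get?] at hv'
        cases hfind : List.find? (fun q => q.1 == k) rest with
        | none => simp [hfind] at hv'
        | some q =>
          have hq := List.find?_eq_some_iff_append.mp hfind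
          simp only [PySem.Dict.contains, List.any_eq_true]
          exact ⟨q, List.mem_of_find?_eq_some hfind, hq.1⟩
      have hcont : (PySem.Dict.mk (p :: rest)).contains k = true := by
        simp only [PySem.Dict.contains, List.any_cons]
        simp only [PySem.Dict.contains] at hcr
        simp [hcr]
      simp only [PySem.Dict.insert, hcont, hcr, if_pos] at ihr ⊢
      have hpk : (p.1 == k) = false := by simp [hp]
      simp only [List.map_cons, hpk, Bool.false_eq_true, if_neg, not_false_iff]
      have hlist : List.map (fun q => if (q.1 == k) = true then (k, v) else q) rest = rest :=
        congrArg PySem.Dict.items ihr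
      rw [hlist]

-- the one-step unfolding of pvAltGo on a cons cell
theorem pvAltGo_cons (d : PySem.Dict Int Int) (v : Int) (t : List Int) :
    pvAltGo d (v :: t) =
      pvAltGo (if d.getD v 0 < 1 + (pvRunLen v t : Int)
               then d.insert v (1 + (pvRunLen v t : Int)) else d)
        (t.drop (pvRunLen v t)) := by
  rw [pvAltGo]

-- main invariant: A's element fold, started inside a run of c already counted k times
-- (and already recorded in d), finishes like B's run loop on the rest
theorem pv_main (t : List Int) : ∀ (c k : Int) (d : PySem.Dict Int Int),
    d.keys.Nodup → d.get? c = some (d.getD c 0) → 1 ≤ k → k ≤ d.getD c 0 →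
    (t.foldl pvStepA (c, k, d)).2.2 =
      pvAltGo (if d.getD c 0 < k + (pvRunLen c t : Int)
               then d.insert c (k + (pvRunLen c t : Int)) else d)
        (t.drop (pvRunLen c t)) := by
  induction t with
  | nil =>
    intro c k d hnd hg h1 hk
    simp only [List.foldl_nil, pvRunLen, Nat.cast_zero, add_zero, List.drop_nil]
    rw [if_neg (by omega), pvAltGo]
  | cons x t' ih =>
    intro c k d hnd hg h1 hk
    by_cases hx : x = c
    · subst hx
      have hstep : pvStepA (x, k, d) x = (x, k + 1, d.insert x (max (d.getD x 0) (k + 1))) := by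
        simp [pvStepA]
      set g := d.getD x 0 with hgdef
      set mr := d.insert x (max g (k + 1)) with hmr
      have hnd' : mr.keys.Nodup := PySem.Dict.nodup_keys_insert d x (max g (k + 1)) hnd
      have hg' : mr.get? x = some (mr.getD x 0) := by
        rw [hmr, PySem.Dict.get?_insert_self, PySem.Dict.getD_insert_self]
      have hk' : k + 1 ≤ mr.getD x 0 := by
        rw [hmr, PySem.Dict.getD_insert_self]; omega
      have hrl : pvRunLen x (x :: t') = 1 + pvRunLen x t' := by simp [pvRunLen]
      simp only [List.foldl_cons, hstep, hrl]
      rw [ih x (k + 1) mr hnd' hg' (by omega) hk']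
      have hdrop : (x :: t').drop (1 + pvRunLen x t') = t'.drop (pvRunLen x t') := by
        rw [Nat.add_comm]
        simp [List.drop_succ_cons]
      rw [hdrop]
      congr 1
      have hmg : mr.getD x 0 = max g (k + 1) := by
        rw [hmr, PySem.Dict.getD_insert_self]
      simp only [hmg, Nat.cast_add, Nat.cast_one]
      split_ifs with h1 h2 h3
      · rw [hmr, pv_insert_insert]
        congr 1
        omega
      · exfalso
        rcases max_cases g (k + 1) with ⟨hM, _⟩ | ⟨hM, _⟩ <;> omega
      · rw [hmr]
        congr 1
        rcases max_cases g (k + 1) with ⟨hM, _⟩ | ⟨hM, _⟩ <;> omega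
      · rw [hmr, max_eq_left (by omega : k + 1 ≤ g)]
        exact pv_insert_self d x g hnd hg
    · have hmaxg : max (d.getD c 0) k = d.getD c 0 := by omega
      have hd1 : d.insert c (max (d.getD c 0) k) = d := by
        rw [hmaxg]
        exact pv_insert_self d c (d.getD c 0) hnd hg
      have hstep : pvStepA (c, k, d) x = (x, 1, d.insert x (max (d.getD x 0) 1)) := by
        simp only [pvStepA]
        rw [if_neg hx]
        simp only [hd1]
      set gx := d.getD x 0 with hgx
      set mr := d.insert x (max gx 1) with hmr
      have hnd' : mr.keys.Nodup := PySem.Dict.nodup_keys_insert d x (max gx 1) hnd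
      have hg' : mr.get? x = some (mr.getD x 0) := by
        rw [hmr, PySem.Dict.get?_insert_self, PySem.Dict.getD_insert_self]
      have hk' : (1 : Int) ≤ mr.getD x 0 := by
        rw [hmr, PySem.Dict.getD_insert_self]; omega
      have hrl : pvRunLen c (x :: t') = 0 := by simp [pvRunLen, hx]
      simp only [List.foldl_cons, hstep, hrl, Nat.cast_zero, add_zero, List.drop_zero]
      rw [if_neg (by omega : ¬ d.getD c 0 < k), pvAltGo_cons]
      rw [ih x 1 mr hnd' hg' le_rfl hk']
      congr 1
      have hmg : mr.getD x 0 = max gx 1 := by rw [hmr, PySem.Dict.getD_insert_self]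
      simp only [hmg]
      have hget : d.get? x = some gx ∨ gx = 0 := by
        cases hq : d.get? x with
        | none =>
          right
          rw [hgx, PySem.Dict.getD_eq_get?_getD, hq]
          rfl
        | some w =>
          left
          have hw : gx = w := by rw [hgx, PySem.Dict.getD_eq_get?_getD, hq]; rfl
          exact congrArg some hw.symm
      split_ifs with h1 h2 h3
      · rw [hmr, pv_insert_insert]
      · exfalso
        rcases max_cases gx 1 with ⟨hM, _⟩ | ⟨hM, _⟩ <;> omega
      · rw [hmr]
        congr 1
        rcases max_cases gx 1 with ⟨hM, _⟩ | ⟨hM, _⟩ <;> omega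
      · rw [hmr, max_eq_left (by omega : (1 : Int) ≤ gx)]
        rcases hget with hget | hget
        · exact pv_insert_self d x gx hnd hget
        · exfalso
          omega

-- ===== VERDICT (by name: the statement is the Claim_ definition above) =====
theorem dict_runs_spec : Claim_equal_dict_runs := by
  intro arr _
  unfold Spec_dict_runs
  cases arr with
  | nil => simp [dict_runs, dict_runs_alt, pvAltGo, PySem.Dict.empty]
  | cons a t =>
    have hbridge :
        (PySem.List.pyRange 1 ((a :: t).length : Int) 1).foldl
            (fun s i => pvStepA s (PySem.List.pyGetD (a :: t) i 0))
            (PySem.List.pyGetD (a :: t) 0 0, 1,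
              PySem.Dict.empty.insert (PySem.List.pyGetD (a :: t) 0 0) 1)
          = t.foldl pvStepA (a, 1, PySem.Dict.empty.insert a 1) := by
      rw [PySem.List.pyGetD_zero_cons]
      have hb := PySem.List.foldl_pyRange_pyGetD' (a :: t) (0 : Int) pvStepA
        (a, 1, PySem.Dict.empty.insert a 1) (a := 1) (by omega)
      simpa using hb
    simp only [dict_runs, hbridge, dict_runs_alt]
    set d0 := PySem.Dict.empty.insert a (1 : Int) with hd0
    have hnd : d0.keys.Nodup :=
      PySem.Dict.nodup_keys_insert PySem.Dict.empty a 1 PySem.Dict.nodup_keys_empty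
    have hg : d0.get? a = some (d0.getD a 0) := by
      rw [hd0, PySem.Dict.get?_insert_self, PySem.Dict.getD_insert_self]
    have hgd : d0.getD a 0 = 1 := by rw [hd0, PySem.Dict.getD_insert_self]
    rw [pv_main t a 1 d0 hnd hg le_rfl (by omega)]
    rw [pvAltGo_cons]
    congr 2
    have hge : PySem.Dict.empty.getD a (0 : Int) = 0 := by
      simp [PySem.Dict.getD_eq_get?_getD, PySem.Dict.get?_empty]
    rw [hge, hgd]
    split_ifs with h1 h2 h3
    · rw [hd0, pv_insert_insert]
    · exfalso
      omega
    · rw [hd0]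
      congr 1
      omega
    · exfalso
      omega
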